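-- pv_equiv track=rewrite | github.com/MrBrantCode/unitest_baseline | mut_generate/mist_train_cf/cf_6679/solution.py | sort_string_list
-- ===== SOURCE A (Python) =====
-- def sort_string_list(string_list):
--     """
--     Sorts a given list of strings in descending order based on the sum of the Unicode values of each character in the string.
--     The sorting prioritizes strings where the string itself is a palindrome and its length is a prime number.
--     The sorting algorithm used is stable.
--     """
--     def is_prime(n):
--         if n <= 1:
--             return False
--         for i in range(2, int(n**0.5) + 1):
--             if n % i == 0:
--                 return False
--         return True
--
--     def is_palindrome(s):
--         return s == s[::-1]
--
--     def get_unicode_sum(s):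
--         return sum(ord(c) for c in s)
--
--     def is_prime_len_palindrome(s):
--         return is_prime(len(s)) and is_palindrome(s)
--
--     return sorted(string_list, key=lambda x: (-is_prime_len_palindrome(x), -get_unicode_sum(x)))
-- ===== SOURCE B (Python) =====
-- def sort_string_list(string_list):
--     def is_prime(n):
--         if n < 2:
--             return False
--         d = 2
--         while d * d <= n:
--             if n % d == 0:
--                 return False
--             d += 1
--         return True
--
--     def is_palindrome(s):
--         i, j = 0, len(s) - 1
--         while i < j:
--             if s[i] != s[j]:
--                 return False
--             i += 1
--             j -= 1
--         return True
--
--     def unicode_sum(s):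
--         total = 0
--         for c in s:
--             total += ord(c)
--         return total
--
--     special = []
--     rest = []
--     for s in string_list:
--         if is_prime(len(s)) and is_palindrome(s):
--             special.append(s)
--         else:
--             rest.append(s)
--     return sorted(special, key=unicode_sum, reverse=True) + sorted(rest, key=unicode_sum, reverse=True)
-- ===== Notes on version B (the rewrite author's own statement) =====
-- stated objective: alternative
-- what changed: Instead of one sort with a composite (-flag, -unicode_sum) tuple key, B partitions the list in one pass into the palindrome-prime bucket and the rest (preserving order), sorts each bucket with key=unicode_sum and reverse=True, and concatenates; its helpers are also rewritten (d*d<=n trial division, two-pointer palindrome check, accumulator sum).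
import Mathlib
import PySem

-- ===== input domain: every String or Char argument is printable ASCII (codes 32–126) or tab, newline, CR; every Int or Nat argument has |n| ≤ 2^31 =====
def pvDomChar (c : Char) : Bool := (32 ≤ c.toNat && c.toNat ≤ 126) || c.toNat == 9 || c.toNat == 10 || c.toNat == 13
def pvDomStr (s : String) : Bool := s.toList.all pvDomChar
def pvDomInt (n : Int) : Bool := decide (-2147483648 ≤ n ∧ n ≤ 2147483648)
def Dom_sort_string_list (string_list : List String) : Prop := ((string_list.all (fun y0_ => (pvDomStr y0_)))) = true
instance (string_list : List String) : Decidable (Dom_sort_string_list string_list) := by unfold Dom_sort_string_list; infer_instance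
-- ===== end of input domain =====

-- B replaces A's single sort with a composite (-flag, -sum) tuple key by a one-pass stable
-- partition into the palindrome-prime bucket and the rest, each sorted with reverse=True on
-- the plain unicode sum and concatenated; B's helpers are also rewritten (d*d<=n trial
-- division, two-pointer palindrome, accumulator sum).  Objective: alternative decomposition.

-- ===== PORT A =====
-- is_prime: 'int(n**0.5)' is ported as Nat.sqrt, exact for the lengths of ASCII strings here
def pvIsPrime (n : Int) : Bool :=
  if n ≤ 1 then false
  else !(PySem.List.pyRange 2 ((Nat.sqrt n.toNat : Int) + 1) 1).any
        (fun i => PySem.Int.mod n i == 0)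

-- is_palindrome: s == s[::-1], exact on List Char
def pvIsPalindrome (s : String) : Bool := s.toList == s.toList.reverse

-- get_unicode_sum: sum(ord(c) for c in s)
def pvUnicodeSum (s : String) : Int := (s.toList.map (fun c => (c.toNat : Int))).sum

-- is_prime_len_palindrome
def pvFlag (s : String) : Bool := pvIsPrime (s.toList.length : Int) && pvIsPalindrome s

-- sorted(string_list, key=lambda x: (-is_prime_len_palindrome(x), -get_unicode_sum(x)))
-- (Python's bool negates to the int -1/0)
def sort_string_list (string_list : List String) : List String :=
  PySem.List.sorted2 string_list
    (fun x => -(if pvFlag x then (1 : Int) else 0))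
    (fun x => -(pvUnicodeSum x)) false

-- ===== PORT B =====
-- while d*d <= n: trial division (n, d stay Python ints)
def bPrimeLoop (n : Int) (d : Int) : Bool :=
  if h : d * d ≤ n then
    if PySem.Int.mod n d == 0 then false else bPrimeLoop n (d + 1)
  else true
termination_by (n + 1 - d).toNat
decreasing_by
  have h1 : 0 ≤ d * d := mul_self_nonneg d
  have h2 : 2 * d - 1 ≤ d * d := by nlinarith
  omega

def bPrime (n : Int) : Bool := if n < 2 then false else bPrimeLoop n 2

-- two-pointer palindrome check over the characters; the indices are in range whenever the
-- loop body runs, so Nat indices with getD are exact (j = len-1 truncates to 0 only when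
-- the string is empty, where the loop does not run in Python either)
def bPalLoop (cs : List Char) (i j : Nat) : Bool :=
  if i < j then
    if cs.getD i ' ' != cs.getD j ' ' then false
    else bPalLoop cs (i + 1) (j - 1)
  else true
termination_by j - i

def bPal (s : String) : Bool := bPalLoop s.toList 0 (s.toList.length - 1)

-- unicode_sum with a running accumulator
def bSum (s : String) : Int := s.toList.foldl (fun total c => total + (c.toNat : Int)) 0

-- the single partition pass (order-preserving)
def bSplit (xs : List String) : List String × List String :=
  match xs with
  | [] => ([], [])
  | s :: t =>
    let r := bSplit t
    if bPrime (s.toList.length : Int) && bPal s then (s :: r.1, r.2) else (r.1, s :: r.2)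

def sort_string_list_alt (string_list : List String) : List String :=
  let p := bSplit string_list
  PySem.List.sorted p.1 bSum true ++ PySem.List.sorted p.2 bSum true

-- ===== PRECONDITION & SPEC =====
def Spec_sort_string_list (string_list : List String) (out : List String) : Prop := out = sort_string_list_alt string_list
instance (string_list : List String) (out : List String) : Decidable (Spec_sort_string_list string_list out) := by unfold Spec_sort_string_list; infer_instance

-- ===== CLAIM (what is proved, stated in full; the proofs are below) =====
def Claim_equal_sort_string_list : Prop := ∀ (string_list : List String), Dom_sort_string_list string_list → Spec_sort_string_list string_list (sort_string_list string_list)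

-- ===== LEMMAS AND PROOFS =====

-- B's accumulator sum is A's sum-of-map
theorem bSum_eq (s : String) : bSum s = pvUnicodeSum s := by
  simp [bSum, pvUnicodeSum, PySem.List.foldl_add]

-- B's d*d<=n loop sees exactly the divisor candidates A's range sees
theorem bPrimeLoop_iff (n d : Int) (hd : 0 < d) :
    bPrimeLoop n d = true ↔ ∀ e : Int, d ≤ e → e * e ≤ n → PySem.Int.mod n e ≠ 0 := by
  rw [bPrimeLoop]
  split
  · rename_i h
    by_cases hm : PySem.Int.mod n d = 0
    · simp only [hm, beq_self_eq_true, if_true, Bool.false_eq_true, false_iff]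
      intro hall
      exact hall d le_rfl h hm
    · have hne : (PySem.Int.mod n d == 0) = false := by simp [hm]
      rw [hne]
      simp only [Bool.false_eq_true, if_false]
      rw [bPrimeLoop_iff n (d+1) (by omega)]
      constructor
      · intro hall e he hee
        rcases eq_or_lt_of_le he with rfl | hlt
        · exact hm
        · exact hall e (by omega) hee
      · intro hall e he hee
        exact hall e (by omega) hee
  · rename_i h
    simp only [true_iff]
    intro e he hee hm
    have : d * d ≤ e * e := by nlinarith
    omega
termination_by (n + 1 - d).toNat
decreasing_by
  have h2 : 2 * d - 1 ≤ d * d := by nlinarith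
  omega

theorem bPrime_eq (m : Nat) : bPrime (m : Int) = pvIsPrime (m : Int) := by
  unfold bPrime pvIsPrime
  by_cases h2 : (m : Int) < 2
  · rw [if_pos h2, if_pos (by omega)]
  · rw [if_neg h2, if_neg (by omega)]
    rw [Bool.eq_iff_iff]
    rw [bPrimeLoop_iff _ _ (by omega)]
    simp only [Bool.not_eq_eq_eq_not, Bool.not_true, List.any_eq_false]
    constructor
    · intro hall i hi
      rw [PySem.List.mem_pyRange_one] at hi
      obtain ⟨hi1, hi2⟩ := hi
      have hmm : (m : Int).toNat = m := by omega
      rw [hmm] at hi2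
      have hsq : i.toNat ≤ Nat.sqrt m := by omega
      have hnn := Nat.le_sqrt.1 hsq
      have hit : (i.toNat : Int) = i := by omega
      have hii : i * i ≤ (m : Int) := by
        have h' : ((i.toNat * i.toNat : Nat) : Int) ≤ (m : Int) := by exact_mod_cast hnn
        push_cast at h'
        rw [hit] at h'
        exact h'
      simpa using hall i hi1 hii
    · intro hall e he hee
      have het : (e.toNat : Int) = e := by omega
      have hsq : e.toNat * e.toNat ≤ m := by
        have h' : (e.toNat : Int) * (e.toNat : Int) ≤ (m : Int) := by rw [het]; exact hee
        exact_mod_cast h'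
      have : e.toNat ≤ Nat.sqrt m := Nat.le_sqrt.2 hsq
      have hmem : e ∈ PySem.List.pyRange 2 ((Nat.sqrt (m:Int).toNat : Int) + 1) 1 := by
        rw [PySem.List.mem_pyRange_one]
        constructor
        · exact he
        · have : (m : Int).toNat = m := by omega
          rw [this]; omega
      have := hall e hmem
      simpa using this

-- B's two-pointer loop is A's reversal test
theorem bPalLoop_iff (cs : List Char) (i j : Nat) :
    bPalLoop cs i j = true ↔
      ∀ k, i ≤ k → 2 * k < i + j → cs.getD k ' ' = cs.getD (i + j - k) ' ' := by
  rw [bPalLoop]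
  split
  · rename_i hij
    by_cases hne : cs.getD i ' ' = cs.getD j ' '
    · have h1 : (cs.getD i ' ' != cs.getD j ' ') = false := by
        simp only [bne_eq_false_iff_eq]; exact hne
      rw [h1]
      simp only [Bool.false_eq_true, if_false]
      rw [bPalLoop_iff cs (i+1) (j-1)]
      constructor
      · intro hall k hk h2k
        rcases Nat.eq_or_lt_of_le hk with rfl | hlt
        · simpa [Nat.add_sub_cancel_left] using hne
        · by_cases hmid : 2 * k < (i+1) + (j-1)
          · have := hall k (by omega) hmid
            have hs : (i+1) + (j-1) - k = i + j - k := by omega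
            rwa [hs] at this
          · omega
      · intro hall k hk h2k
        have := hall k (by omega) (by omega)
        have hs : (i+1) + (j-1) - k = i + j - k := by omega
        rwa [hs]
    · have h1 : (cs.getD i ' ' != cs.getD j ' ') = true := by
        simp only [bne_iff_ne, ne_eq]; exact hne
      rw [h1]
      simp only [if_true, Bool.false_eq_true, false_iff]
      intro hall
      exact hne (by simpa [Nat.add_sub_cancel_left] using hall i le_rfl (by omega))
  · rename_i hij
    simp only [true_iff]
    intro k hk h2k
    omega
termination_by j - i

theorem bPal_eq (s : String) : bPal s = pvIsPalindrome s := by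
  unfold bPal pvIsPalindrome
  rw [Bool.eq_iff_iff, bPalLoop_iff]
  set cs := s.toList with hcs
  simp only [beq_iff_eq]
  constructor
  · intro hall
    apply List.ext_getElem (by simp)
    intro k hk hk'
    rw [List.getElem_reverse]
    have hg : ∀ m (hm : m < cs.length), cs[m]'hm = cs.getD m ' ' := by
      intro m hm; rw [List.getD_eq_getElem]
    rw [hg k hk, hg (cs.length - 1 - k) (by omega)]
    rcases Nat.lt_trichotomy (2 * k) (cs.length - 1) with h | h | h
    · have := hall k (by omega) (by omega)
      simpa using this
    · have hkk : cs.length - 1 - k = k := by omega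
      rw [hkk]
    · have := hall (cs.length - 1 - k) (by omega) (by omega)
      have hs : 0 + (cs.length - 1) - (cs.length - 1 - k) = k := by omega
      rw [hs] at this
      exact this.symm
  · intro hrev k hk h2k
    have hkl : k < cs.length := by omega
    have hjl : cs.length - 1 - k < cs.length := by omega
    have h1 : cs.getD k ' ' = cs[k]'hkl := List.getD_eq_getElem _ _ hkl
    have h2 : cs.getD (0 + (cs.length - 1) - k) ' ' = cs[cs.length - 1 - k]'hjl := by
      have : 0 + (cs.length - 1) - k = cs.length - 1 - k := by omega
      rw [this]
      exact List.getD_eq_getElem _ _ hjl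
    rw [h1, h2, List.getElem_of_eq hrev hkl, List.getElem_reverse]

-- reverse=True with an Int key is the ascending sort under the negated key
theorem sorted_rev_eq_sorted_neg {α : Type} (xs : List α) (k : α → Int) :
    PySem.List.sorted xs k true = PySem.List.sorted xs (fun x => -(k x)) false := by
  have hcmp : (fun a b => decide (k b < k a)) = (fun (a b : α) => decide (-(k a) < -(k b))) := by
    funext a b
    rw [decide_eq_decide]
    exact (neg_lt_neg_iff).symm
  rw [PySem.List.sorted_rev_eq_foldl_insertBy, PySem.List.sorted_eq_foldl_insertBy, hcmp]

-- B's partition pass is the pair of filters under A's flag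
theorem bSplit_eq (xs : List String) :
    bSplit xs = (xs.filter pvFlag, xs.filter (fun s => !pvFlag s)) := by
  induction xs with
  | nil => rfl
  | cons s t ih =>
    have hf : (bPrime (s.toList.length : Int) && bPal s) = pvFlag s := by
      rw [bPrime_eq s.toList.length, bPal_eq]; rfl
    simp only [bSplit, hf, ih]
    cases hp : pvFlag s <;> simp [hp]

-- insertion skips a prefix it never goes before
theorem insertBy_append_of_not_before {α : Type} (before : α → α → Bool) (x : α)
    (l r : List α) (h : ∀ y ∈ l, before x y = false) :
    PySem.List.insertBy before x (l ++ r) = l ++ PySem.List.insertBy before x r := by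
  induction l with
  | nil => rfl
  | cons a t ih =>
    have ha : before x a = false := h a (by simp)
    simp [PySem.List.insertBy, ha, ih (fun y hy => h y (by simp [hy]))]

-- insertion lands inside the left part when it goes before everything on the right
theorem insertBy_append_of_all_before {α : Type} (before : α → α → Bool) (x : α)
    (l r : List α) (h : ∀ y ∈ r, before x y = true) :
    PySem.List.insertBy before x (l ++ r) = PySem.List.insertBy before x l ++ r := by
  induction l with
  | nil =>
    cases r with
    | nil => rfl
    | cons a t => simp [PySem.List.insertBy, h a (by simp)]
  | cons a t ih =>
    by_cases ha : before x a = true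
    · simp [PySem.List.insertBy, ha]
    · simp at ha
      simp [PySem.List.insertBy, ha, ih]

-- the comparator only matters on the elements actually present
theorem insertBy_congr {α : Type} (b₁ b₂ : α → α → Bool) (x : α) (l : List α)
    (h : ∀ y ∈ l, b₁ x y = b₂ x y) :
    PySem.List.insertBy b₁ x l = PySem.List.insertBy b₂ x l := by
  induction l with
  | nil => rfl
  | cons a t ih =>
    have ha := h a (by simp)
    by_cases hb : b₁ x a = true
    · simp [PySem.List.insertBy, hb, ha ▸ hb]
    · simp at hb
      simp [PySem.List.insertBy, hb, ha ▸ hb, ih (fun y hy => h y (by simp [hy]))]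

-- key fact: the stable sort under the lexicographic key (-flag, k) is the
-- stable partition by the flag with each bucket stably sorted under k
theorem sorted2_flag_eq_partition {α : Type} (p : α → Bool) (k : α → Int) (xs : List α) :
    PySem.List.sorted2 xs (fun x => -(if p x then (1 : Int) else 0)) k false
      = PySem.List.sorted (xs.filter p) k false
        ++ PySem.List.sorted (xs.filter (fun x => !p x)) k false := by
  induction xs using List.reverseRecOn with
  | nil => rfl
  | append_singleton t x ih =>
    have hmem1 : ∀ y ∈ PySem.List.sorted (t.filter p) k false, p y = true := by
      intro y hy
      have := (PySem.List.mem_sorted _ _ _ _).1 hy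
      exact (List.mem_filter.1 this).2
    have hmem2 : ∀ y ∈ PySem.List.sorted (t.filter (fun x => !p x)) k false, p y = false := by
      intro y hy
      have := (PySem.List.mem_sorted _ _ _ _).1 hy
      simpa using (List.mem_filter.1 this).2
    simp only [PySem.List.sorted2, PySem.List.sorted, Bool.false_eq_true, if_false,
      List.foldl_append, List.foldl_cons, List.foldl_nil] at *
    rw [ih]
    set cmp2 : α → α → Bool := fun a b =>
      decide ((-(if p a then (1:Int) else 0)) < (-(if p b then (1:Int) else 0))) ||
      (!decide ((-(if p b then (1:Int) else 0)) < (-(if p a then (1:Int) else 0))) &&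
        decide (k a < k b)) with hcmp2
    set cmp : α → α → Bool := fun a b => decide (k a < k b) with hcmp
    by_cases hx : p x = true
    · rw [insertBy_append_of_all_before cmp2 x _ _
          (fun y hy => by simp [hcmp2, hx, hmem2 y hy]),
        insertBy_congr cmp2 cmp x _
          (fun y hy => by simp [hcmp2, hcmp, hx, hmem1 y hy]),
        List.filter_append, List.filter_append]
      simp [hx, List.foldl_append]
    · simp at hx
      rw [insertBy_append_of_not_before cmp2 x _ _
          (fun y hy => by simp [hcmp2, hx, hmem1 y hy]),
        insertBy_congr cmp2 cmp x _
          (fun y hy => by simp [hcmp2, hcmp, hx, hmem2 y hy]),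
        List.filter_append, List.filter_append]
      simp [hx, List.foldl_append]

-- ===== VERDICT (by name: the statement is the Claim_ definition above) =====
theorem sort_string_list_spec : Claim_equal_sort_string_list := by
  intro string_list _
  unfold Spec_sort_string_list sort_string_list sort_string_list_alt
  rw [bSplit_eq, sorted2_flag_eq_partition pvFlag (fun s => -(pvUnicodeSum s)) string_list]
  have hs : ∀ l : List String,
      PySem.List.sorted l bSum true = PySem.List.sorted l (fun s => -(pvUnicodeSum s)) false := by
    intro l
    rw [sorted_rev_eq_sorted_neg]
    congr 1
    funext s
    rw [bSum_eq]
  simp only [hs]
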